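-- pv_equiv track=rewrite | github.com/sma-de/ansible-collections-base | plugins/action/normalize_blacklist_packages.py | build_safe_package_name
-- ===== SOURCE A (Python) =====
-- def build_safe_package_name(pname):
--     repl_map = {
--       '-': '_',
--       '.': '_',
--       '~': '_',
--       ':': '_',
--     }
--
--     for k,v in repl_map.items():
--         pname = pname.replace(k, v)
--
--     return pname
-- ===== SOURCE B (Python) =====
-- def build_safe_package_name(pname):
--     return ''.join('_' if c in '-.~:' else c for c in pname)
-- ===== Notes on version B (the rewrite author's own statement) =====
-- stated objective: simpler
-- what changed: Replaced four sequential whole-string replace passes (a loop over a replacement dict) with a single character-wise pass that emits an underscore for any special character, joined into the result.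
import Mathlib
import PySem

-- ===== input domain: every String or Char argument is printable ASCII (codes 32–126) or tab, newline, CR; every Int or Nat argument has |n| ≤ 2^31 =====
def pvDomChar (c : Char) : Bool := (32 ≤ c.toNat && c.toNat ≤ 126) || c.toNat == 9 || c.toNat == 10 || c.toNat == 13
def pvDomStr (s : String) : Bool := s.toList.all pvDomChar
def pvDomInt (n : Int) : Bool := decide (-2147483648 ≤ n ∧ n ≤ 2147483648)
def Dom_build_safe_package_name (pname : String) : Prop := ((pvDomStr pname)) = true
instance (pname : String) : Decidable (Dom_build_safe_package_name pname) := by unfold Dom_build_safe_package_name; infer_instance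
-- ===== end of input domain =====

-- B replaces A's four sequential whole-string replace passes with one character-wise pass; objective: simpler.

-- ===== PORT A =====
-- A builds a dict of four single-char replacements and applies str.replace once per entry.
def build_safe_package_name (pname : String) : String :=
  let repl_map : PySem.Dict String String :=
    PySem.Dict.ofList [("-", "_"), (".", "_"), ("~", "_"), (":", "_")]
  repl_map.items.foldl (fun p kv => PySem.Str.replace p kv.1 kv.2) pname

-- ===== PORT B =====
-- ''.join('_' if c in '-.~:' else c for c in pname): one pass over the characters.
def build_safe_package_name_alt (pname : String) : String :=
  String.ofList (pname.toList.map (fun c => if c ∈ ['-', '.', '~', ':'] then '_' else c))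

-- ===== PRECONDITION & SPEC =====
def Spec_build_safe_package_name (pname : String) (out : String) : Prop := out = build_safe_package_name_alt pname
instance (pname : String) (out : String) : Decidable (Spec_build_safe_package_name pname out) := by unfold Spec_build_safe_package_name; infer_instance

-- ===== CLAIM (what is proved, stated in full; the proofs are below) =====
def Claim_equal_build_safe_package_name : Prop := ∀ (pname : String), Dom_build_safe_package_name pname → Spec_build_safe_package_name pname (build_safe_package_name pname)

-- ===== LEMMAS AND PROOFS =====

-- Chars.replace.go with a single-character pattern is a map, fuel = list length.
lemma replace_go_single (o n : Char) : ∀ (s acc : List Char),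
    PySem.Chars.replace.go [o] [n] s.length s acc
      = acc.reverse ++ s.map (fun c => if c = o then n else c) := by
  intro s
  induction s with
  | nil => intro acc; simp [PySem.Chars.replace.go]
  | cons c t ih =>
    intro acc
    by_cases h : o = c
    · subst h
      simp [PySem.Chars.replace.go, List.isPrefixOf, ih]
    · have hne : (o == c) = false := by simp [h]
      simp [PySem.Chars.replace.go, List.isPrefixOf, hne, ih, Ne.symm h]

-- str.replace with single-character old/new is a character map.
lemma replace_single (s : List Char) (o n : Char) :
    PySem.Chars.replace s [o] [n] = s.map (fun c => if c = o then n else c) := by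
  simp [PySem.Chars.replace, replace_go_single]

-- ===== VERDICT (by name: the statement is the Claim_ definition above) =====
theorem build_safe_package_name_spec : Claim_equal_build_safe_package_name := by
  intro pname _
  unfold Spec_build_safe_package_name build_safe_package_name_alt
  have hA : build_safe_package_name pname
      = PySem.Str.replace (PySem.Str.replace (PySem.Str.replace
          (PySem.Str.replace pname "-" "_") "." "_") "~" "_") ":" "_" := rfl
  rw [hA]
  apply String.ext
  simp only [PySem.Str.toList_replace, String.toList_ofList]
  have h1 : ("-" : String).toList = ['-'] := rfl
  have h2 : ("." : String).toList = ['.'] := rfl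
  have h3 : ("~" : String).toList = ['~'] := rfl
  have h4 : (":" : String).toList = [':'] := rfl
  have hu : ("_" : String).toList = ['_'] := rfl
  rw [h1, h2, h3, h4, hu]
  simp only [replace_single, List.map_map]
  apply List.map_congr_left
  intro c _
  by_cases e1 : c = '-' <;> by_cases e2 : c = '.' <;> by_cases e3 : c = '~' <;>
    by_cases e4 : c = ':' <;> simp_all [Function.comp]
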